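-- pv_equiv track=rewrite | github.com/Avazbek99/elemes | app/face_api/routes.py | _get_boundary_from_content_type
-- ===== SOURCE A (Python) =====
-- def _get_boundary_from_content_type(content_type):
--     """Content-Type dan boundary qiymatini ajratib oladi."""
--     if not content_type:
--         return None
--     for part in content_type.split(';'):
--         part = part.strip()
--         if part.lower().startswith('boundary='):
--             boundary = part[9:].strip().strip('"\'')
--             return boundary
--     return None
-- ===== SOURCE B (Python) =====
-- def _get_boundary_from_content_type(content_type):
--     """Content-Type dan boundary qiymatini ajratib oladi."""
--     if not content_type:
--         return None
--     params = {}
--     for part in content_type.split(';'):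
--         part = part.strip()
--         eq = part.find('=')
--         if eq != -1:
--             params.setdefault(part[:eq].lower(), part[eq + 1:].strip().strip('"\''))
--     return params.get('boundary')
-- ===== Notes on version B (the rewrite author's own statement) =====
-- stated objective: simpler
-- what changed: B splits the header into semicolon-separated parts and builds a first-wins parameter dict (key = lowercased name before the first equals sign, value = stripped and unquoted remainder), then looks the boundary parameter up, instead of A's scan that returns on the first part whose lowercase form has the boundary prefix.
import Mathlib
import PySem

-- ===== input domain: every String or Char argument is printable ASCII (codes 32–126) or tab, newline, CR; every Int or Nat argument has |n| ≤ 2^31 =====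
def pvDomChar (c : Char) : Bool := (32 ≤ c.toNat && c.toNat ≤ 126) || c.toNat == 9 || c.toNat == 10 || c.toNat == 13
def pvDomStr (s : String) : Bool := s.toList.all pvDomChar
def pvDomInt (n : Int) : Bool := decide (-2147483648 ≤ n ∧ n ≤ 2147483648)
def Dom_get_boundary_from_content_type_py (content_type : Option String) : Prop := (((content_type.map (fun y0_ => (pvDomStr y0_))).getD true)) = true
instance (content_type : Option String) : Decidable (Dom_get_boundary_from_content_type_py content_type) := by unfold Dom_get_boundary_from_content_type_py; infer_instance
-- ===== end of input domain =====

-- ===== PORT A =====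
-- B parses all semicolon-separated parts into a first-wins parameter dict (lowercased name before the first equals sign) and looks the boundary parameter up, instead of A's scan-and-return-on-first-match; objective: simpler.
def pvALoop : List String → Option String
  | [] => none
  | p :: rest =>
    let part := PySem.Str.strip p
    if PySem.Str.startswith (PySem.Str.lower part) "boundary=" then
      some (PySem.Str.stripChars (PySem.Str.strip (PySem.Str.slice part (some 9) none)) "\"'")
    else pvALoop rest

def get_boundary_from_content_type_py (content_type : Option String) : Option String :=
  match content_type with
  | none => none
  | some s =>
    if s = "" then none
    else pvALoop ((PySem.Str.split? s ";").getD [])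

-- ===== PORT B =====
def pvBStep (d : PySem.Dict String String) (p : String) : PySem.Dict String String :=
  let part := PySem.Str.strip p
  let eq := PySem.Str.find part "="
  if eq ≠ -1 then
    d.setdefault (PySem.Str.lower (PySem.Str.slice part none (some eq)))
      (PySem.Str.stripChars (PySem.Str.strip (PySem.Str.slice part (some (eq + 1)) none)) "\"'")
  else d

def get_boundary_from_content_type_py_alt (content_type : Option String) : Option String :=
  match content_type with
  | none => none
  | some s =>
    if s = "" then none
    else ((((PySem.Str.split? s ";").getD []).foldl pvBStep PySem.Dict.empty)).get? "boundary"

-- ===== PRECONDITION & SPEC =====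
def Spec_get_boundary_from_content_type_py (content_type : Option String) (out : Option String) : Prop := out = get_boundary_from_content_type_py_alt content_type
instance (content_type : Option String) (out : Option String) : Decidable (Spec_get_boundary_from_content_type_py content_type out) := by unfold Spec_get_boundary_from_content_type_py; infer_instance

-- ===== CLAIM (what is proved, stated in full; the proofs are below) =====
def Claim_equal_get_boundary_from_content_type_py : Prop := ∀ (content_type : Option String), Dom_get_boundary_from_content_type_py content_type → Spec_get_boundary_from_content_type_py content_type (get_boundary_from_content_type_py content_type)

-- ===== LEMMAS AND PROOFS =====

-- lowerChar sends only '=' to '='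
theorem pvLowerCharEq (c : Char) (h : PySem.Chars.lowerChar c = '=') : c = '=' := by
  unfold PySem.Chars.lowerChar at h
  split at h
  case isTrue hu =>
    exfalso
    simp only [PySem.Chars.isupper, Bool.and_eq_true, decide_eq_true_eq, Char.le_def] at hu
    obtain ⟨h1, h2⟩ := hu
    have hb : c.toNat ≤ 90 := UInt32.le_iff_toNat_le.mp h2
    have ha : 65 ≤ c.toNat := UInt32.le_iff_toNat_le.mp h1
    have h3 := congrArg Char.toNat h
    rw [Char.toNat_ofNat] at h3
    rw [if_pos (by left; omega)] at h3
    have : ('=' : Char).toNat = 61 := by decide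
    omega
  case isFalse => exact h

theorem pvMemLower (u : List Char) (h : '=' ∈ PySem.Chars.lower u) : '=' ∈ u := by
  simp only [PySem.Chars.lower, List.mem_map] at h
  obtain ⟨c, hc, hl⟩ := h
  exact (pvLowerCharEq c hl) ▸ hc

-- cancellation of prefixes of the shape a ++ x :: s when x occurs in neither side
theorem pvPrefixCancel {α : Type} (x : α) : ∀ (a b s t : List α), x ∉ a → x ∉ b →
    a ++ x :: s <+: b ++ x :: t → a = b := by
  intro a
  induction a with
  | nil =>
    intro b s t _ hb h
    cases b with
    | nil => rfl
    | cons y b' =>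
      exfalso
      simp only [List.nil_append, List.cons_append, List.cons_prefix_cons] at h
      exact hb (h.1 ▸ List.mem_cons_self)
  | cons c a' ih =>
    intro b s t ha hb h
    cases b with
    | nil =>
      exfalso
      simp only [List.cons_append, List.nil_append, List.cons_prefix_cons] at h
      exact ha (h.1 ▸ List.mem_cons_self)
    | cons y b' =>
      simp only [List.cons_append, List.cons_prefix_cons] at h
      have := ih b' s t (fun hx => ha (List.mem_cons_of_mem _ hx)) (fun hx => hb (List.mem_cons_of_mem _ hx)) h.2
      rw [h.1, this]

-- spec of Chars.find for the single-character needle '='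
theorem pvFindGoSpec : ∀ (l : List Char) (k : Nat),
    (PySem.Chars.find.go ['='] l k = -1 ∧ '=' ∉ l) ∨
    (∃ u v, l = u ++ '=' :: v ∧ '=' ∉ u ∧ PySem.Chars.find.go ['='] l k = ((k + u.length : Nat) : Int)) := by
  intro l
  induction l with
  | nil =>
    intro k
    left
    constructor
    · simp [PySem.Chars.find.go]
    · simp
  | cons c t ih =>
    intro k
    by_cases hc : c = '='
    case pos =>
      right
      refine ⟨[], t, by rw [hc]; rfl, by simp, ?_⟩
      simp [PySem.Chars.find.go, hc, List.isPrefixOf]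
    case neg =>
      have hgo : PySem.Chars.find.go ['='] (c :: t) k = PySem.Chars.find.go ['='] t (k + 1) := by
        simp [PySem.Chars.find.go, List.isPrefixOf, Ne.symm hc]
      rcases ih (k + 1) with ⟨h1, h2⟩ | ⟨u, v, hl, hu, hk⟩
      · left
        refine ⟨by rw [hgo]; exact h1, ?_⟩
        simp only [List.mem_cons, not_or]
        exact ⟨fun h => hc h.symm, h2⟩
      · right
        refine ⟨c :: u, v, by rw [hl]; rfl, ?_, ?_⟩
        · simp only [List.mem_cons, not_or]
          exact ⟨fun h => hc h.symm, hu⟩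
        rw [hgo, hk]
        congr 1
        simp only [List.length_cons]
        omega

theorem pvFindSpec (l : List Char) :
    (PySem.Chars.find l ['='] = -1 ∧ '=' ∉ l) ∨
    (∃ u v, l = u ++ '=' :: v ∧ '=' ∉ u ∧ PySem.Chars.find l ['='] = (u.length : Int)) := by
  have h := pvFindGoSpec l 0
  simpa [PySem.Chars.find] using h

-- lower distributes over the decomposition
theorem pvLowerDecomp (u v : List Char) :
    PySem.Chars.lower (u ++ '=' :: v) = PySem.Chars.lower u ++ '=' :: PySem.Chars.lower v := by
  simp [PySem.Chars.lower]
  decide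

-- A's condition holds exactly when the text before the FIRST '=' lowercases to "boundary"
theorem pvCondIff (u v : List Char) (hu : '=' ∉ u) :
    PySem.Chars.startswith (PySem.Chars.lower (u ++ '=' :: v)) "boundary=".toList = true ↔
      PySem.Chars.lower u = "boundary".toList := by
  rw [PySem.Chars.startswith_iff, pvLowerDecomp]
  constructor
  · intro h
    have hB : "boundary=".toList = "boundary".toList ++ '=' :: ([] : List Char) := by decide
    rw [hB] at h
    have hprefix : "boundary".toList ++ '=' :: ([] : List Char) <+: PySem.Chars.lower u ++ '=' :: PySem.Chars.lower v := h
    have hnb : '=' ∉ "boundary".toList := by decide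
    have hnu : '=' ∉ PySem.Chars.lower u := fun hx => hu (pvMemLower u hx)
    exact (pvPrefixCancel '=' _ _ _ _ hnb hnu hprefix).symm
  · intro h
    rw [h]
    have hB : "boundary=".toList = "boundary".toList ++ ['='] := by decide
    refine ⟨PySem.Chars.lower v, ?_⟩
    rw [hB]
    simp

-- the B fold looked up at "boundary" is A's first-match scan (first-wins setdefault)
set_option maxHeartbeats 1000000 in
theorem pvLoopSpec : ∀ (parts : List String) (d : PySem.Dict String String),
    (parts.foldl pvBStep d).get? "boundary" = (d.get? "boundary").or (pvALoop parts) := by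
  intro parts
  induction parts with
  | nil =>
    intro d
    cases h : d.get? "boundary" <;> simp [pvALoop, h]
  | cons p rest ih =>
    intro d
    rw [List.foldl_cons, ih]
    have hfind : PySem.Str.find (PySem.Str.strip p) "=" =
        PySem.Chars.find (PySem.Str.strip p).toList ['='] := by
      rw [PySem.Str.find_eq]; rfl
    rcases pvFindSpec (PySem.Str.strip p).toList with ⟨hf, hmem⟩ | ⟨u, v, hl, hu, hf⟩
    · -- no '=' in the part: B skips it and A's condition is false
      have hstep : pvBStep d p = d := by
        simp only [pvBStep]
        rw [if_neg (by rw [hfind, hf]; simp)]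
      have hcond : PySem.Str.startswith (PySem.Str.lower (PySem.Str.strip p)) "boundary=" = false := by
        rw [Bool.eq_false_iff]
        intro hc
        rw [PySem.Str.startswith_eq] at hc
        have hpre := (PySem.Chars.startswith_iff _ _).mp (by rw [PySem.Str.toList_lower] at hc; exact hc)
        have : '=' ∈ PySem.Chars.lower (PySem.Str.strip p).toList := hpre.mem (by decide)
        exact hmem (pvMemLower _ this)
      rw [hstep]
      have hA : pvALoop (p :: rest) = pvALoop rest := by
        simp only [pvALoop, hcond, Bool.false_eq_true, if_false]
      rw [hA]
    · -- part = u ++ '=' :: v with '=' ∉ u; B's key is (lower u)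
      have hkeyList : (PySem.Str.lower (PySem.Str.slice (PySem.Str.strip p) none (some ((u.length : Nat) : Int)))).toList
          = PySem.Chars.lower u := by
        rw [PySem.Str.toList_lower, PySem.Str.toList_slice, PySem.Chars.slice_eq_listSlice,
            PySem.List.slice_to_natCast, hl]
        congr 1
        exact List.take_left
      have hne : PySem.Str.find (PySem.Str.strip p) "=" ≠ -1 := by
        rw [hfind, hf]; omega
      by_cases hkey : PySem.Chars.lower u = "boundary".toList
      · -- the boundary parameter itself
        have hlen : u.length = 8 := by
          have := congrArg List.length hkey
          simpa [PySem.Chars.lower] using this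
        have hkeyStr : PySem.Str.lower (PySem.Str.slice (PySem.Str.strip p) none (some ((u.length : Nat) : Int))) = "boundary" := by
          apply String.toList_inj.mp
          rw [hkeyList, hkey]
        have hcond : PySem.Str.startswith (PySem.Str.lower (PySem.Str.strip p)) "boundary=" = true := by
          rw [PySem.Str.startswith_eq]
          have := (pvCondIff u v hu).mpr hkey
          rw [PySem.Str.toList_lower, hl]
          exact this
        have hstep : pvBStep d p = d.setdefault "boundary"
            (PySem.Str.stripChars (PySem.Str.strip (PySem.Str.slice (PySem.Str.strip p) (some 9) none)) "\"'") := by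
          simp only [pvBStep]
          rw [if_pos hne, hfind, hf, hkeyStr, hlen]
          norm_num
        have hA : pvALoop (p :: rest) = some
            (PySem.Str.stripChars (PySem.Str.strip (PySem.Str.slice (PySem.Str.strip p) (some 9) none)) "\"'") := by
          simp only [pvALoop, hcond, if_true]
        rw [hstep, PySem.Dict.get?_setdefault_self, hA]
        cases d.get? "boundary" <;> simp
      · -- some other parameter: the dict entry at "boundary" is untouched and A skips too
        have hkeyStr : PySem.Str.lower (PySem.Str.slice (PySem.Str.strip p) none (some ((u.length : Nat) : Int))) ≠ "boundary" := by
          intro h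
          exact hkey (by rw [← hkeyList, h])
        have hcond : PySem.Str.startswith (PySem.Str.lower (PySem.Str.strip p)) "boundary=" = false := by
          rw [Bool.eq_false_iff]
          intro hc
          rw [PySem.Str.startswith_eq, PySem.Str.toList_lower, hl] at hc
          exact hkey ((pvCondIff u v hu).mp hc)
        have hstep : (pvBStep d p).get? "boundary" = d.get? "boundary" := by
          simp only [pvBStep]
          rw [if_pos hne, hfind, hf]
          exact PySem.Dict.get?_setdefault_of_ne d _ (fun h => hkeyStr h.symm)
        rw [hstep]
        have hA : pvALoop (p :: rest) = pvALoop rest := by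
          simp only [pvALoop, hcond, Bool.false_eq_true, if_false]
        rw [hA]

-- ===== VERDICT (by name: the statement is the Claim_ definition above) =====
theorem get_boundary_from_content_type_py_spec : Claim_equal_get_boundary_from_content_type_py := by
  unfold Claim_equal_get_boundary_from_content_type_py
  intro ct _
  unfold Spec_get_boundary_from_content_type_py
  cases ct with
  | none => rfl
  | some s =>
    by_cases hs : s = ""
    · simp [get_boundary_from_content_type_py, get_boundary_from_content_type_py_alt, hs]
    · simp only [get_boundary_from_content_type_py, get_boundary_from_content_type_py_alt, if_neg hs]
      rw [pvLoopSpec]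
      rfl
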